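-- pv_equiv track=rewrite | github.com/cmester0/GameJams | Racebile/racebile.py | gen_map_from_dirs
-- ===== SOURCE A (Python) =====
-- def step_dir(x,y,d):
--     if d == 0:
--         return (x+1, y+0)
--     elif d == 1:
--         return (x+0, y+1)
--     elif d == 2:
--         return (x-1, y+1)
--     elif d == 3:
--         return (x-1, y+0)
--     elif d == 4:
--         return (x+0, y-1)
--     elif d == 5:
--         return (x+1, y-1)
--
-- def gen_map_from_dirs(dirs):
--     x = 0
--     y = 0
--     gm = []
--     for d in dirs:
--         gm.append((x,y,d))
--         x,y = step_dir(x,y,d)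
--     return gm
-- ===== SOURCE B (Python) =====
-- def gen_map_from_dirs(dirs):
--     OFF = {0: (1, 0), 1: (0, 1), 2: (-1, 1), 3: (-1, 0), 4: (0, -1), 5: (1, -1)}
--
--     def solve(seg):
--         # returns (map of seg relative to the origin, total displacement of seg)
--         if not seg:
--             return [], (0, 0)
--         if len(seg) == 1:
--             d = seg[0]
--             return [(0, 0, d)], OFF[d]
--         m = len(seg) // 2
--         left, (lx, ly) = solve(seg[:m])
--         right, (rx, ry) = solve(seg[m:])
--         merged = left + [(x + lx, y + ly, d) for (x, y, d) in right]
--         return merged, (lx + rx, ly + ry)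
--
--     return solve(dirs)[0]
-- ===== Notes on version B (the rewrite author's own statement) =====
-- stated objective: alternative
-- what changed: Replaces the left-to-right stateful walk by a divide-and-conquer: each half is solved recursively relative to the origin and the right half's sub-map is translated by the left half's total displacement, exploiting translation invariance of the path.
import Mathlib
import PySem

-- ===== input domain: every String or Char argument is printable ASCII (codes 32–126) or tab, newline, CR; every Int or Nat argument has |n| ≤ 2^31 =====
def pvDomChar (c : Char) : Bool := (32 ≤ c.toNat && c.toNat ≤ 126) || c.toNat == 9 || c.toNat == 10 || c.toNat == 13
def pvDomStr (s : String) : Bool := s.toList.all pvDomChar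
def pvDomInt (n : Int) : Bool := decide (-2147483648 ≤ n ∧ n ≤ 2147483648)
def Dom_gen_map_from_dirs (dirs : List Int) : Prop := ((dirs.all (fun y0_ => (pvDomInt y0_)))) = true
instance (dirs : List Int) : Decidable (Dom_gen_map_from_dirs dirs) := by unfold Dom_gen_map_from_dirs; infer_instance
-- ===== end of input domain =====

-- B replaces A's left-to-right stateful walk by divide-and-conquer on the list of directions:
-- each half is solved relative to the origin, the right half's map is translated by the left
-- half's total displacement (objective: alternative; correct by translation invariance).

-- ===== PORT A =====
-- step_dir; the fall-through 'return None' of Python (d outside 0..5) is excluded by Pre_,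
-- the else branch here is never claimed about.
def stepDir (x y d : Int) : Int × Int :=
  if d = 0 then (x + 1, y + 0)
  else if d = 1 then (x + 0, y + 1)
  else if d = 2 then (x - 1, y + 1)
  else if d = 3 then (x - 1, y + 0)
  else if d = 4 then (x + 0, y - 1)
  else if d = 5 then (x + 1, y - 1)
  else (x, y)

def gen_map_from_dirs (dirs : List Int) : List (Int × Int × Int) :=
  let st := dirs.foldl
    (fun (st : Int × Int × List (Int × Int × Int)) d =>
      let x := st.1
      let y := st.2.1
      let gm := st.2.2
      let p := stepDir x y d
      (p.1, p.2, gm ++ [(x, y, d)]))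
    (0, 0, [])
  st.2.2

-- ===== PORT B =====
-- OFF[d]; a KeyError (d outside 0..5) is excluded by Pre_, the else branch is never claimed about.
def gmOff (d : Int) : Int × Int :=
  if d = 0 then (1, 0)
  else if d = 1 then (0, 1)
  else if d = 2 then (-1, 1)
  else if d = 3 then (-1, 0)
  else if d = 4 then (0, -1)
  else if d = 5 then (1, -1)
  else (0, 0)

-- solve(seg): (map of seg relative to the origin, total displacement of seg)
def gmSolve : List Int → (List (Int × Int × Int)) × (Int × Int)
  | [] => ([], (0, 0))
  | [d] => ([(0, 0, d)], gmOff d)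
  | a :: b :: rest =>
    let seg := a :: b :: rest
    let m := seg.length / 2
    let L := gmSolve (seg.take m)
    let R := gmSolve (seg.drop m)
    (L.1 ++ R.1.map (fun p => (p.1 + L.2.1, p.2.1 + L.2.2, p.2.2)),
     (L.2.1 + R.2.1, L.2.2 + R.2.2))
termination_by seg => seg.length
decreasing_by
  · simp [List.length_take]; omega
  · simp [List.length_drop]; omega

def gen_map_from_dirs_alt (dirs : List Int) : List (Int × Int × Int) :=
  (gmSolve dirs).1

-- ===== PRECONDITION & SPEC =====
-- Pre_: every direction is a valid hex direction 0..5; on any other value Python A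
-- raises TypeError (step_dir returns None and the tuple unpack fails).
def Pre_gen_map_from_dirs (dirs : List Int) : Prop := ∀ d ∈ dirs, 0 ≤ d ∧ d ≤ 5
instance (dirs : List Int) : Decidable (Pre_gen_map_from_dirs dirs) := by
  unfold Pre_gen_map_from_dirs; infer_instance

def pvWitness_gen_map_from_dirs : List Int := [0, 1, 2, 3, 4, 5, 0, 2]

def Spec_gen_map_from_dirs (dirs : List Int) (out : List (Int × Int × Int)) : Prop := out = gen_map_from_dirs_alt dirs
instance (dirs : List Int) (out : List (Int × Int × Int)) : Decidable (Spec_gen_map_from_dirs dirs out) := by unfold Spec_gen_map_from_dirs; infer_instance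

-- ===== CLAIM (what is proved, stated in full; the proofs are below) =====
def Claim_equal_gen_map_from_dirs : Prop := ∀ (dirs : List Int), Dom_gen_map_from_dirs dirs → Pre_gen_map_from_dirs dirs → Spec_gen_map_from_dirs dirs (gen_map_from_dirs dirs)

-- ===== LEMMAS AND PROOFS =====

-- reference recursion: the list A builds starting from position (x,y)
def gmSpec : Int → Int → List Int → List (Int × Int × Int)
  | _, _, [] => []
  | x, y, d :: ds => (x, y, d) :: gmSpec (stepDir x y d).1 (stepDir x y d).2 ds

theorem foldA_eq (ds : List Int) : ∀ (x y : Int) (gm : List (Int × Int × Int)),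
    (ds.foldl
      (fun (st : Int × Int × List (Int × Int × Int)) d =>
        let x := st.1
        let y := st.2.1
        let gm := st.2.2
        let p := stepDir x y d
        (p.1, p.2, gm ++ [(x, y, d)]))
      (x, y, gm)).2.2 = gm ++ gmSpec x y ds := by
  induction ds with
  | nil => intro x y gm; simp [gmSpec]
  | cons d ds ih =>
      intro x y gm
      simp only [List.foldl_cons, gmSpec]
      rw [ih]
      simp

-- step_dir is exactly a translation by the offset vector (also on the else branch)
theorem stepDir_eq_off (x y d : Int) :
    stepDir x y d = (x + (gmOff d).1, y + (gmOff d).2) := by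
  unfold stepDir gmOff
  split_ifs <;> simp <;> ring

-- translation invariance of the reference map
theorem gmSpec_shift (ds : List Int) : ∀ (x y a b : Int),
    gmSpec (x + a) (y + b) ds = (gmSpec x y ds).map (fun p => (p.1 + a, p.2.1 + b, p.2.2)) := by
  induction ds with
  | nil => intro x y a b; simp [gmSpec]
  | cons d ds ih =>
      intro x y a b
      simp only [gmSpec, List.map_cons]
      rw [stepDir_eq_off (x + a), stepDir_eq_off x]
      have h1 : x + a + (gmOff d).1 = x + (gmOff d).1 + a := by ring
      have h2 : y + b + (gmOff d).2 = y + (gmOff d).2 + b := by ring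
      rw [h1, h2, ih]

-- total displacement of a segment
def gmDisp : List Int → Int × Int
  | [] => (0, 0)
  | d :: ds => ((gmOff d).1 + (gmDisp ds).1, (gmOff d).2 + (gmDisp ds).2)

theorem gmDisp_append (l r : List Int) :
    gmDisp (l ++ r) = ((gmDisp l).1 + (gmDisp r).1, (gmDisp l).2 + (gmDisp r).2) := by
  induction l with
  | nil => simp [gmDisp]
  | cons d ds ih => simp only [List.cons_append, gmDisp, ih]; exact Prod.ext (by ring) (by ring)

theorem gmSpec_append (l : List Int) : ∀ (r : List Int) (x y : Int),
    gmSpec x y (l ++ r) = gmSpec x y l ++ gmSpec (x + (gmDisp l).1) (y + (gmDisp l).2) r := by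
  induction l with
  | nil => intro r x y; simp [gmSpec, gmDisp]
  | cons d ds ih =>
      intro r x y
      simp only [List.cons_append, gmSpec, gmDisp]
      rw [ih, stepDir_eq_off]
      have h1 : x + (gmOff d).1 + (gmDisp ds).1 = x + ((gmOff d).1 + (gmDisp ds).1) := by ring
      have h2 : y + (gmOff d).2 + (gmDisp ds).2 = y + ((gmOff d).2 + (gmDisp ds).2) := by ring
      rw [h1, h2]

-- divide-and-conquer computes the origin-relative reference map and the displacement
theorem gmSolve_eq (seg : List Int) : gmSolve seg = (gmSpec 0 0 seg, gmDisp seg) := by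
  induction seg using gmSolve.induct with
  | case1 => simp [gmSolve, gmSpec, gmDisp]
  | case2 d =>
      simp [gmSolve, gmSpec, gmDisp]
  | case3 a b rest seg m ihT ihD =>
      rw [gmSolve]
      simp only [seg, m] at ihT ihD
      rw [ihT, ihD]
      have hsplit : (a :: b :: rest) =
          (a :: b :: rest).take ((a :: b :: rest).length / 2) ++
          (a :: b :: rest).drop ((a :: b :: rest).length / 2) := by
        rw [List.take_append_drop]
      dsimp only
      refine Prod.ext ?_ ?_
      · conv_rhs => rw [hsplit]
        rw [gmSpec_append]
        have := gmSpec_shift ((a :: b :: rest).drop ((a :: b :: rest).length / 2)) 0 0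
          (gmDisp ((a :: b :: rest).take ((a :: b :: rest).length / 2))).1
          (gmDisp ((a :: b :: rest).take ((a :: b :: rest).length / 2))).2
        simp only [zero_add] at this
        dsimp only
        simp only [zero_add]
        rw [this]
      · conv_rhs => rw [hsplit, gmDisp_append]

-- ===== VERDICT (by name: the statement is the Claim_ definition above) =====
theorem gen_map_from_dirs_spec : Claim_equal_gen_map_from_dirs := by
  intro dirs _ _
  unfold Spec_gen_map_from_dirs gen_map_from_dirs gen_map_from_dirs_alt
  simp only
  rw [foldA_eq, gmSolve_eq]
  simp
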